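-- pv_equiv track=rewrite | github.com/ABorrel/bioisosterism | smileAnalysis.py | countlenRing
-- ===== SOURCE A (Python) =====
-- def countlenRing (smile):
--
--     c = 0
--     size = len (smile)
--     i = 0
--     ring_open = 0
--
--     while i < size :
--         if ring_open == 0 :
--             if smile[i] == "1" and smile[i-1].upper () == "C":
--                 c = c + 1
--                 ring_open = 1
--         elif ring_open == 1 :
--             if smile[i] == "(" :
--                 ring_open = 2
--             elif smile[i].upper () == "C" :
--                 c = c + 1
--             elif smile[i] == "1":
--                 return c
--             elif smile[i] != "=" and smile[i] != "[" and smile[i] != "]" and smile[i] != "#" and smile[i] != "@" and smile[i] != "H":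
--                 return 99
--         elif ring_open == 2 :
--             if smile[i] == ")" :
--                 ring_open = 1
--
--         i = i + 1
--
--     return 1
-- ===== SOURCE B (Python) =====
-- def countlenRing(smile):
--     # phase 1: locate the ring-opening '1' whose predecessor (Python [-1] wrap) is a carbon
--     k = smile.find("1")
--     while k != -1 and smile[k - 1].upper() != "C":
--         k = smile.find("1", k + 1)
--     if k == -1:
--         return 1
--     # phase 2: rewrite the tail — delete each '(' .. next-')' chunk (truncate at an unclosed '(')
--     tail = smile[k + 1:]
--     parts = []
--     while True:
--         p = tail.find("(")
--         if p == -1: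
--             parts.append(tail)
--             break
--         parts.append(tail[:p])
--         q = tail.find(")", p + 1)
--         if q == -1:
--             break
--         tail = tail[q + 1:]
--     flat = "".join(parts)
--     # phase 3: judge the ring body declaratively on the slice up to the closing '1'
--     e = flat.find("1")
--     body = flat if e == -1 else flat[:e]
--     if any(ch.upper() != "C" and ch not in "=[]#@H" for ch in body):
--         return 99
--     if e == -1:
--         return 1
--     return 1 + sum(ch.upper() == "C" for ch in body)
-- ===== Notes on version B (the rewrite author's own statement) =====
-- stated objective: faster
-- what changed: A's single three-state while loop is replaced by three separate stages: a str.find loop locating the ring-opening '1' preceded (with Python's negative-index wraparound) by a carbon, a string-rewrite loop that deletes every '(' .. next-')' chunk from the tail with find/slices, and a final declarative judgement that slices the rewritten string up to the closing '1' and decides 99/count/1 by a membership test and a carbon count over that slice instead of per-character state transitions. …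
import Mathlib
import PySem

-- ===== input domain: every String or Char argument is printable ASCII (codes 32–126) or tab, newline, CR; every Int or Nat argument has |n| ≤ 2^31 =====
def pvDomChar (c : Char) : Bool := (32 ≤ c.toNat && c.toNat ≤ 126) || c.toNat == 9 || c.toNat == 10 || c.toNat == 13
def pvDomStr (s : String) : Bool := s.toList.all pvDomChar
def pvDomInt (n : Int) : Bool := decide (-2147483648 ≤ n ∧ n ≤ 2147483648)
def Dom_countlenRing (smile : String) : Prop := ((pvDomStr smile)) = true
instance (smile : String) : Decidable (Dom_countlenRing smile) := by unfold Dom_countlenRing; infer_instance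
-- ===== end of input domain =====

-- B replaces A's three-state character machine by three stages: a find-loop locating the ring-opening
-- digit, a string rewrite deleting each parenthesised chunk, and a declarative slice/count judgement;
-- objective: faster constant factor (C-level str.find/slice/count instead of a per-character Python loop), measured.

-- ===== PORT A =====
-- A's while loop: recursion over the remaining characters; `prev` carries smile[i-1]
-- (initialised to the LAST character, reproducing Python's smile[-1] wraparound at i = 0).
def pvLoopA : List Char → Char → Int → Int → Int
  | [], _, _, _ => 1
  | ch :: rest, prev, c, ring_open =>
    if ring_open = 0 then
      if ch = '1' ∧ prev.toUpper = 'C' then pvLoopA rest ch (c + 1) 1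
      else pvLoopA rest ch c 0
    else if ring_open = 1 then
      if ch = '(' then pvLoopA rest ch c 2
      else if ch.toUpper = 'C' then pvLoopA rest ch (c + 1) 1
      else if ch = '1' then c
      else if ch ≠ '=' ∧ ch ≠ '[' ∧ ch ≠ ']' ∧ ch ≠ '#' ∧ ch ≠ '@' ∧ ch ≠ 'H' then 99
      else pvLoopA rest ch c 1
    else -- ring_open = 2
      if ch = ')' then pvLoopA rest ch c 1
      else pvLoopA rest ch c 2

def countlenRing (smile : String) : Int :=
  pvLoopA smile.toList (smile.toList.getLastD ' ') 0 0

-- ===== PORT B =====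
-- phase 1: Source B's find-loop over occurrences of '1'; returns the suffix after the first '1'
-- whose predecessor (with Python's [-1] wraparound, carried as `prev`) is a carbon
def pvFindOpen : List Char → Char → Option (List Char)
  | [], _ => none
  | ch :: rest, prev =>
    if ch = '1' ∧ prev.toUpper = 'C' then some rest else pvFindOpen rest ch

-- tail.find(')', p+1): the suffix after the next ')'
def pvFindClose : List Char → Option (List Char)
  | [] => none
  | ch :: rest => if ch = ')' then some rest else pvFindClose rest

theorem pvFindClose_length : ∀ (cs r : List Char), pvFindClose cs = some r → r.length < cs.length := by
  intro cs
  induction cs with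
  | nil => intro r h; simp [pvFindClose] at h
  | cons ch rest ih =>
    intro r h
    by_cases hc : ch = ')'
    · simp [pvFindClose, hc] at h; simp [← h, List.length_cons]
    · simp [pvFindClose, hc] at h
      have := ih r h; simp [List.length_cons]; omega

-- phase 2: the rewrite loop — keep characters up to each '(', delete through the matching ')',
-- truncate at an unclosed '('
def pvFlat : List Char → List Char
  | [] => []
  | ch :: rest =>
    if ch = '(' then
      match h : pvFindClose rest with
      | none => []
      | some r => pvFlat r
    else ch :: pvFlat rest
termination_by cs => cs.length
decreasing_by
  · exact Nat.lt_of_lt_of_le (pvFindClose_length _ _ h) (by simp [List.length_cons])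
  · simp [List.length_cons]

-- ch.upper() != "C" and ch not in "=[]#@H"
def pvBad (ch : Char) : Bool :=
  !(ch.toUpper == 'C') && !(ch == '=' || ch == '[' || ch == ']' || ch == '#' || ch == '@' || ch == 'H')

-- phase 3: slice to the closing '1', one membership test, one count
def pvJudge (flat : List Char) (c : Int) : Int :=
  let body := flat.takeWhile (fun ch => ch ≠ '1')
  if body.any pvBad then 99
  else if flat.any (fun ch => ch = '1') then c + (body.countP (fun ch => ch.toUpper == 'C') : Int)
  else 1

def countlenRing_alt (smile : String) : Int :=
  match pvFindOpen smile.toList (smile.toList.getLastD ' ') with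
  | none => 1
  | some rest => pvJudge (pvFlat rest) 1

-- ===== PRECONDITION & SPEC =====
def Spec_countlenRing (smile : String) (out : Int) : Prop := out = countlenRing_alt smile
instance (smile : String) (out : Int) : Decidable (Spec_countlenRing smile out) := by unfold Spec_countlenRing; infer_instance

-- ===== CLAIM (what is proved, stated in full; the proofs are below) =====
def Claim_equal_countlenRing : Prop := ∀ (smile : String), Dom_countlenRing smile → Spec_countlenRing smile (countlenRing smile)

-- ===== LEMMAS AND PROOFS =====

theorem pvFlat_nil : pvFlat [] = [] := by rw [pvFlat]

theorem pvFlat_cons_paren (rest : List Char) :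
    pvFlat ('(' :: rest) = match pvFindClose rest with
      | none => []
      | some r => pvFlat r := by
  rw [pvFlat, if_pos rfl]
  split <;> simp_all

theorem pvFlat_cons_other (ch : Char) (rest : List Char) (h : ch ≠ '(') :
    pvFlat (ch :: rest) = ch :: pvFlat rest := by
  rw [pvFlat, if_neg h]

theorem pvJudge_nil (c : Int) : pvJudge [] c = 1 := by simp [pvJudge]

theorem pvJudge_one (fl : List Char) (c : Int) : pvJudge ('1' :: fl) c = c := by
  simp [pvJudge, List.takeWhile]

theorem pvJudge_carbon (ch : Char) (fl : List Char) (c : Int) (h : ch.toUpper = 'C') :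
    pvJudge (ch :: fl) c = pvJudge fl (c + 1) := by
  have h1 : ch ≠ '1' := by intro he; subst he; simp at h
  have hbad : pvBad ch = false := by simp [pvBad, h]
  simp only [pvJudge, List.takeWhile_cons, h1, decide_not, if_pos,
    List.any_cons, hbad, Bool.false_or, List.countP_cons, h, beq_self_eq_true, if_pos,
    decide_false, Bool.not_false]
  split_ifs with hb ha <;> first | rfl | (push_cast; ring)

theorem pvJudge_inert (ch : Char) (fl : List Char) (c : Int)
    (h1 : ch ≠ '1') (hC : ch.toUpper ≠ 'C')
    (hm : ch = '=' ∨ ch = '[' ∨ ch = ']' ∨ ch = '#' ∨ ch = '@' ∨ ch = 'H') :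
    pvJudge (ch :: fl) c = pvJudge fl c := by
  have hbad : pvBad ch = false := by
    simp only [pvBad]
    rcases hm with h|h|h|h|h|h <;> subst h <;> simp
  have hcnt : (ch.toUpper == 'C') = false := by simp [hC]
  simp only [pvJudge, List.takeWhile_cons, h1, decide_not,
    List.any_cons, hbad, Bool.false_or, List.countP_cons, hcnt, decide_false,
    Bool.not_false, if_false]
  simp [hbad, hcnt, List.countP_cons]

theorem pvJudge_bad (ch : Char) (fl : List Char) (c : Int)
    (h1 : ch ≠ '1') (hb : pvBad ch = true) :
    pvJudge (ch :: fl) c = 99 := by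
  simp [pvJudge, List.takeWhile, h1, hb]

-- in states 1 and 2 the carried `prev` is never read
theorem pvLoopA_prev_irrel (cs : List Char) (p q : Char) (c ro : Int)
    (hro : ro = 1 ∨ ro = 2) : pvLoopA cs p c ro = pvLoopA cs q c ro := by
  rcases hro with h | h <;> subst h <;> cases cs <;> simp [pvLoopA]

-- A's state-2 scan = jump past the next ')'
theorem pvLoopA_state2 : ∀ (cs : List Char) (p : Char) (c : Int),
    pvLoopA cs p c 2 = match pvFindClose cs with
      | none => 1
      | some r => pvLoopA r ' ' c 1 := by
  intro cs
  induction cs with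
  | nil => intro p c; simp [pvFindClose, pvLoopA]
  | cons ch rest ih =>
    intro p c
    by_cases hc : ch = ')'
    · subst hc
      simp only [pvLoopA, pvFindClose]
      norm_num
      exact pvLoopA_prev_irrel _ _ _ _ _ (Or.inl rfl)
    · simp only [pvLoopA, pvFindClose, if_neg hc]
      norm_num
      exact ih ch c

-- A's state-1 loop = B's rewrite-then-judge
theorem pvLoopA_state1 : ∀ (n : Nat) (cs : List Char), cs.length = n → ∀ (p : Char) (c : Int),
    pvLoopA cs p c 1 = pvJudge (pvFlat cs) c := by
  intro n
  induction n using Nat.strong_induction_on with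
  | _ n ih =>
    intro cs hn p c
    match cs with
    | [] => simp [pvLoopA, pvFlat_nil, pvJudge_nil]
    | ch :: rest =>
      simp only [pvLoopA]
      norm_num
      by_cases h1 : ch = '('
      · subst h1
        rw [if_pos rfl, pvLoopA_state2, pvFlat_cons_paren]
        cases hfc : pvFindClose rest with
        | none => simp [pvJudge_nil]
        | some r =>
          have hlt : r.length < n := by
            have := pvFindClose_length rest r hfc
            simp [← hn, List.length_cons]; omega
          exact ih r.length hlt r rfl ' ' c
      · rw [if_neg h1, pvFlat_cons_other ch rest h1]
        by_cases h2 : ch.toUpper = 'C'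
        · rw [if_pos h2, pvJudge_carbon ch _ c h2]
          exact ih rest.length (by simp [← hn]) rest rfl ch (c + 1)
        · rw [if_neg h2]
          by_cases h3 : ch = '1'
          · subst h3; rw [if_pos rfl, pvJudge_one]
          · rw [if_neg h3]
            by_cases h4 : ch = '=' ∨ ch = '[' ∨ ch = ']' ∨ ch = '#' ∨ ch = '@' ∨ ch = 'H'
            · rw [if_neg (show ¬(ch ≠ '=' ∧ ch ≠ '[' ∧ ch ≠ ']' ∧ ch ≠ '#' ∧ ch ≠ '@' ∧ ch ≠ 'H') by
                  simp only [ne_eq, not_and_or, not_not]; tauto),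
                pvJudge_inert ch _ c h3 h2 h4]
              exact ih rest.length (by simp [← hn]) rest rfl ch c
            · have hb : pvBad ch = true := by
                simp only [not_or] at h4
                simp [pvBad, h2, h4.1, h4.2.1, h4.2.2.1, h4.2.2.2.1, h4.2.2.2.2.1, h4.2.2.2.2.2]
              rw [if_pos (show ch ≠ '=' ∧ ch ≠ '[' ∧ ch ≠ ']' ∧ ch ≠ '#' ∧ ch ≠ '@' ∧ ch ≠ 'H' by
                  simp only [not_or] at h4; exact ⟨h4.1, h4.2.1, h4.2.2.1, h4.2.2.2.1, h4.2.2.2.2.1, h4.2.2.2.2.2⟩),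
                pvJudge_bad ch _ c h3 hb]

-- A's state-0 search = B's phase 1
theorem pvLoopA_state0 : ∀ (cs : List Char) (p : Char),
    pvLoopA cs p 0 0 = match pvFindOpen cs p with
      | none => 1
      | some r => pvJudge (pvFlat r) 1 := by
  intro cs
  induction cs with
  | nil => intro p; simp [pvFindOpen, pvLoopA]
  | cons ch rest ih =>
    intro p
    by_cases h : ch = '1' ∧ p.toUpper = 'C'
    · simp only [pvLoopA, pvFindOpen, if_pos h]
      norm_num
      exact pvLoopA_state1 rest.length rest rfl ch 1
    · simp only [pvLoopA, pvFindOpen, if_neg h]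
      norm_num
      exact ih ch

-- ===== VERDICT (by name: the statement is the Claim_ definition above) =====
theorem countlenRing_spec : Claim_equal_countlenRing := by
  intro smile _
  unfold Spec_countlenRing countlenRing countlenRing_alt
  rw [pvLoopA_state0]
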